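-- pv_equiv track=rewrite | github.com/marcnolet/interview-examples | ansible/playbooks/package-upgrade/scripts/patch_groups.py | create_patch_groups
-- ===== SOURCE A (Python) =====
-- from collections import defaultdict
-- from typing import List, Dict
--
-- def create_patch_groups(hosts_by_role: Dict[str, List[str]]) -> Dict[str, List[str]]:
--     """
--     Generates patch groups from the given hosts by role.
--
--     This function performs the following tasks:
--     1. Separates non-sharddb roles from sharddb roles.
--     2. Creates patch groups for non-sharddb roles, distributing hosts evenly in reverse order.
--     3. Handles sharddb roles separately, placing them in patch groups 1 and 2.
--
--     Args:
--         hosts_by_role (dict): A dictionary where keys are role names and values are lists of hosts.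
--
--     Returns:
--         dict: A dictionary of patch groups, where keys are group names (e.g., "pg1", "pg2")
--               and values are lists of hosts in that group.
--     """
--
--     non_sharddb_roles = {role: hosts for role, hosts in hosts_by_role.items() \
--                          if role != "be-sharddb"}
--     max_hosts = max(len(hosts) for hosts in non_sharddb_roles.values()) if non_sharddb_roles else 0
--     patch_groups = defaultdict(list)
--
--     for i in range(max_hosts):
--         for role, hosts in non_sharddb_roles.items():
--             if i < len(hosts):
--                 patch_groups[f"pg{i+1}"].append(hosts[i])
--
--     if "be-sharddb" in hosts_by_role:
--         sharddb_hosts = hosts_by_role["be-sharddb"]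
--         if len(sharddb_hosts) == 1:
--             patch_groups["pg1"].extend(sharddb_hosts)
--         else:
--             mid = len(sharddb_hosts) // 2
--             patch_groups["pg2"].extend(sharddb_hosts[:mid])
--             patch_groups["pg1"].extend(sharddb_hosts[mid:])
--
--     return dict(patch_groups)
-- ===== SOURCE B (Python) =====
-- def create_patch_groups(hosts_by_role):
--     patch_groups = {}
--     for role, hosts in hosts_by_role.items():
--         if role != "be-sharddb":
--             for i, host in enumerate(hosts):
--                 patch_groups.setdefault(f"pg{i+1}", []).append(host)
--     sharddb_hosts = hosts_by_role.get("be-sharddb")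
--     if sharddb_hosts is None:
--         return patch_groups
--     if len(sharddb_hosts) == 1:
--         patch_groups.setdefault("pg1", []).extend(sharddb_hosts)
--     else:
--         mid = len(sharddb_hosts) // 2
--         patch_groups.setdefault("pg2", []).extend(sharddb_hosts[:mid])
--         patch_groups.setdefault("pg1", []).extend(sharddb_hosts[mid:])
--     return patch_groups
-- ===== Notes on version B (the rewrite author's own statement) =====
-- stated objective: alternative
-- what changed: B makes a single pass over the roles, enumerating each role's hosts and appending each host directly to its patch group, instead of A's outer loop over range(max_hosts) that rescans every role per index; B also drops the intermediate filtered dict and the max() prescan.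
import Mathlib
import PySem

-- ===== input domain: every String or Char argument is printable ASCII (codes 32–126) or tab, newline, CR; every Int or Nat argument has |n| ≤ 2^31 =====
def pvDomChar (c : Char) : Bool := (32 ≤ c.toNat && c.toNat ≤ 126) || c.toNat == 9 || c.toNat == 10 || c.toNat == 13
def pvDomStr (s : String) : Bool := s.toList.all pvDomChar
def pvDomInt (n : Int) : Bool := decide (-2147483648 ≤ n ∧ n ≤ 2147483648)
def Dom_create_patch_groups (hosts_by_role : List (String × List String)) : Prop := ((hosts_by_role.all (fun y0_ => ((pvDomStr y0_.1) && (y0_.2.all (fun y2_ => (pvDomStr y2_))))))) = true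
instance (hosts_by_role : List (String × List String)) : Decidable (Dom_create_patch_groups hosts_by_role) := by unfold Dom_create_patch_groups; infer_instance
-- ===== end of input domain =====

-- B replaces A's outer loop over range(max_hosts) (which rescans every role per index) by one
-- pass over the roles, enumerating each role's hosts; same return value by a different traversal.

-- Shared helper: both Pythons perform d[k] = d.get(k, []) + vs
-- (A via defaultdict(list)[k].append/extend, B via setdefault(k, []).append/extend).
def pvExtend (d : PySem.Dict String (List String)) (k : String) (vs : List String) :
    PySem.Dict String (List String) :=
  d.insert k (d.getD k [] ++ vs)

-- ===== PORT A =====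
def create_patch_groups (hosts_by_role : List (String × List String)) : List (String × List String) :=
  let d := PySem.Dict.ofList hosts_by_role
  -- the dict comprehension keeps key order and uniqueness, so its items are the filtered items
  let non_sharddb : List (String × List String) := d.items.filter (fun p => !(p.1 == "be-sharddb"))
  let max_hosts : Nat :=
    match PySem.List.max? (non_sharddb.map (fun p => p.2.length)) (fun x => x) with
    | some m => m
    | none => 0          -- 'if non_sharddb else 0'
  let pgs : PySem.Dict String (List String) :=
    (PySem.List.pyRange 0 (Nat.cast max_hosts : Int) 1).foldl (fun acc i =>
      non_sharddb.foldl (fun acc p =>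
        if i < (p.2.length : Int) then
          pvExtend acc ("pg" ++ PySem.Int.toStr (i + 1)) [PySem.List.pyGetD p.2 i ""]
        else acc) acc) PySem.Dict.empty
  let pgs2 : PySem.Dict String (List String) :=
    if d.contains "be-sharddb" then
      let sharddb_hosts := d.getD "be-sharddb" []
      if sharddb_hosts.length == 1 then
        pvExtend pgs "pg1" sharddb_hosts
      else
        let mid : Int := PySem.Int.floordiv (sharddb_hosts.length : Int) 2
        pvExtend (pvExtend pgs "pg2" (PySem.List.slice sharddb_hosts none (some mid))) "pg1"
          (PySem.List.slice sharddb_hosts (some mid) none)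
    else pgs
  pgs2.items

-- ===== PORT B =====
def create_patch_groups_alt (hosts_by_role : List (String × List String)) : List (String × List String) :=
  let d := PySem.Dict.ofList hosts_by_role
  let pgs : PySem.Dict String (List String) :=
    d.items.foldl (fun acc p =>
      if !(p.1 == "be-sharddb") then
        (PySem.List.enumerate p.2 0).foldl (fun acc ih =>
          pvExtend acc ("pg" ++ PySem.Int.toStr (ih.1 + 1)) [ih.2]) acc
      else acc) PySem.Dict.empty
  match d.get? "be-sharddb" with
  | none => pgs.items
  | some sharddb_hosts =>
    if sharddb_hosts.length == 1 then
      (pvExtend pgs "pg1" sharddb_hosts).items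
    else
      let mid : Int := PySem.Int.floordiv (sharddb_hosts.length : Int) 2
      (pvExtend (pvExtend pgs "pg2" (PySem.List.slice sharddb_hosts none (some mid))) "pg1"
        (PySem.List.slice sharddb_hosts (some mid) none)).items

-- ===== PRECONDITION & SPEC =====
def Spec_create_patch_groups (hosts_by_role : List (String × List String)) (out : List (String × List String)) : Prop := out = create_patch_groups_alt hosts_by_role
instance (hosts_by_role : List (String × List String)) (out : List (String × List String)) : Decidable (Spec_create_patch_groups hosts_by_role out) := by unfold Spec_create_patch_groups; infer_instance

-- ===== CLAIM (what is proved, stated in full; the proofs are below) =====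
def Claim_equal_create_patch_groups : Prop := ∀ (hosts_by_role : List (String × List String)), Dom_create_patch_groups hosts_by_role → Spec_create_patch_groups hosts_by_role (create_patch_groups hosts_by_role)

-- ===== LEMMAS AND PROOFS =====

-- ---- decimal-representation injectivity (distinctness of the "pg<i>" keys) ----

def pvDec (c : Char) : Nat := c.toNat - 48

def pvVal (cs : List Char) : Nat := cs.foldl (fun a c => a * 10 + pvDec c) 0

theorem pvVal_foldl (cs : List Char) (a : Nat) :
    cs.foldl (fun a c => a * 10 + pvDec c) a = a * 10 ^ cs.length + pvVal cs := by
  induction cs generalizing a with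
  | nil => simp [pvVal]
  | cons c cs ih =>
    simp only [List.foldl_cons, List.length_cons, pvVal]
    rw [ih, ih (0 * 10 + pvDec c)]
    ring

theorem pvDec_digitChar (d : Nat) (hd : d < 10) : pvDec (Nat.digitChar d) = d := by
  interval_cases d <;> rfl

theorem pvVal_cons (d : Nat) (hd : d < 10) (ds : List Char) :
    pvVal (Nat.digitChar d :: ds) = d * 10 ^ ds.length + pvVal ds := by
  simp only [pvVal, List.foldl_cons]
  rw [pvVal_foldl, pvDec_digitChar _ hd]
  have hv : List.foldl (fun a c => a * 10 + pvDec c) 0 ds = pvVal ds := rfl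
  rw [hv]
  ring

theorem pvVal_toDigitsCore (f : Nat) :
    ∀ (n : Nat) (ds : List Char), n < f →
      pvVal (Nat.toDigitsCore 10 f n ds) = n * 10 ^ ds.length + pvVal ds := by
  induction f with
  | zero => intro n ds h; omega
  | succ f ih =>
    intro n ds h
    rw [Nat.toDigitsCore]
    by_cases h0 : n / 10 = 0
    · rw [if_pos h0, pvVal_cons _ (Nat.mod_lt _ (by omega))]
      have hn : n % 10 = n := by omega
      rw [hn]
    · rw [if_neg h0]
      have hlt : n / 10 < f := by
        have h10 : 10 ≤ n := by
          by_contra hc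
          exact h0 (Nat.div_eq_of_lt (by omega))
        have := Nat.div_lt_self (by omega : 0 < n) (by omega : 1 < 10)
        omega
      rw [ih (n / 10) _ hlt, List.length_cons, pvVal_cons _ (Nat.mod_lt _ (by omega))]
      have hn : n / 10 * 10 + n % 10 = n := by omega
      calc n / 10 * 10 ^ (ds.length + 1) + ((n % 10) * 10 ^ ds.length + pvVal ds)
          = (n / 10 * 10 + n % 10) * 10 ^ ds.length + pvVal ds := by ring
        _ = n * 10 ^ ds.length + pvVal ds := by rw [hn]

theorem pvVal_toDigits (n : Nat) : pvVal (Nat.toDigits 10 n) = n := by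
  have := pvVal_toDigitsCore (n + 1) n [] (by omega)
  simpa [Nat.toDigits, pvVal] using this

theorem toDigits_injective {m n : Nat} (h : Nat.toDigits 10 m = Nat.toDigits 10 n) : m = n := by
  have := congrArg pvVal h
  rwa [pvVal_toDigits, pvVal_toDigits] at this

def pgKey (i : Nat) : String := "pg" ++ PySem.Int.toStr ((i : Int) + 1)

theorem pgKey_injective : Function.Injective pgKey := by
  intro a b h
  have h1 : (pgKey a).toList = (pgKey b).toList := by rw [h]
  simp only [pgKey, String.toList_append, PySem.Int.toList_toStr] at h1
  have h2 : PySem.Int.toChars ((a : Int) + 1) = PySem.Int.toChars ((b : Int) + 1) :=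
    List.append_cancel_left h1
  simp only [PySem.Int.toChars] at h2
  rw [if_neg (by omega), if_neg (by omega)] at h2
  have ha : ((a : Int) + 1).toNat = a + 1 := by omega
  have hb : ((b : Int) + 1).toNat = b + 1 := by omega
  rw [ha, hb] at h2
  have := toDigits_injective h2
  omega

-- ---- the canonical value of the group-building stage ----

def pvCol (rs : List (String × List String)) (i : Nat) : List String :=
  rs.filterMap (fun p => p.2[i]?)

def pvCanon (rs : List (String × List String)) (n : Nat) : List (String × List String) :=
  (List.range n).map (fun i => (pgKey i, pvCol rs i))

def pvMaxLen (rs : List (String × List String)) : Nat :=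
  (rs.map (fun p => p.2.length)).foldl max 0

def stepA (j : Nat) (acc : PySem.Dict String (List String)) (p : String × List String) :
    PySem.Dict String (List String) :=
  if j < p.2.length then pvExtend acc (pgKey j) [p.2.getD j ""] else acc

def stepB (acc : PySem.Dict String (List String)) (p : String × List String) :
    PySem.Dict String (List String) :=
  (PySem.List.enumerate p.2 0).foldl (fun acc ih =>
    pvExtend acc ("pg" ++ PySem.Int.toStr (ih.1 + 1)) [ih.2]) acc

-- ---- behaviour of pvExtend on an items list ----

theorem pvMapNe (l : List (String × List String)) (k : String) (w : String × List String)
    (h : ∀ p ∈ l, p.1 ≠ k) : l.map (fun p => if p.1 == k then w else p) = l := by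
  induction l with
  | nil => rfl
  | cons p l ih =>
    simp only [List.map_cons]
    rw [if_neg (by simpa using h p (List.mem_cons_self ..)),
      ih (fun q hq => h q (List.mem_cons_of_mem _ hq))]

theorem pvExtend_mid (d : PySem.Dict String (List String)) (k : String) (vs : List String)
    (xs zs : List (String × List String)) (a : List String)
    (hit : d.items = xs ++ (k, a) :: zs) (hnd : (d.items.map Prod.fst).Nodup) :
    (pvExtend d k vs).items = xs ++ (k, a ++ vs) :: zs := by
  have hkeys : d.keys = d.items.map Prod.fst := rfl
  have hndk : d.keys.Nodup := by rw [hkeys]; exact hnd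
  have hmem : (k, a) ∈ d.items := by rw [hit]; simp
  have hget : d.getD k [] = a := PySem.Dict.getD_of_mem_items d hmem hndk []
  have hcont : d.contains k = true := by
    rw [PySem.Dict.contains_iff_mem_keys, hkeys, hit]
    simp
  have hmemk : (List.map Prod.fst xs ++ k :: List.map Prod.fst zs).Nodup := by
    have h0 := hnd
    rw [hit] at h0
    simpa using h0
  have hne : ∀ p ∈ xs ++ zs, p.1 ≠ k := by
    have hkn : k ∉ List.map Prod.fst xs ++ List.map Prod.fst zs :=
      (List.nodup_cons.mp (List.nodup_middle.mp hmemk)).1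
    intro p hp hk
    apply hkn
    rcases List.mem_append.mp hp with hh | hh
    · exact List.mem_append.mpr (Or.inl (List.mem_map.mpr ⟨p, hh, hk⟩))
    · exact List.mem_append.mpr (Or.inr (List.mem_map.mpr ⟨p, hh, hk⟩))
  unfold pvExtend
  rw [hget, PySem.Dict.items_insert_of_contains d (a ++ vs) hcont, hit]
  rw [List.map_append, List.map_cons]
  rw [pvMapNe xs k _ (fun p hp => hne p (List.mem_append.mpr (Or.inl hp))),
    pvMapNe zs k _ (fun p hp => hne p (List.mem_append.mpr (Or.inr hp)))]
  simp

theorem pvExtend_fresh (d : PySem.Dict String (List String)) (k : String) (vs : List String)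
    (h : d.contains k = false) :
    (pvExtend d k vs).items = d.items ++ [(k, vs)] := by
  unfold pvExtend
  rw [PySem.Dict.getD_of_not_contains d [] h, PySem.Dict.items_insert_of_not_contains d ([] ++ vs) h]
  simp

-- ---- A's inner loop over the roles, for one fixed index j ----

theorem innerA_ext (j : Nat) (rs : List (String × List String)) :
    ∀ (d : PySem.Dict String (List String)) (xs zs : List (String × List String)) (a : List String),
      d.items = xs ++ (pgKey j, a) :: zs → (d.items.map Prod.fst).Nodup →
      (rs.foldl (stepA j) d).items = xs ++ (pgKey j, a ++ pvCol rs j) :: zs := by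
  induction rs with
  | nil => intro d xs zs a hit _; simpa [pvCol] using hit
  | cons p rs ih =>
    intro d xs zs a hit hnd
    simp only [List.foldl_cons]
    by_cases hj : j < p.2.length
    · have hsome : p.2[j]? = some p.2[j] := List.getElem?_eq_getElem hj
      have hgd : p.2.getD j "" = p.2[j] := by
        rw [List.getD_eq_getElem?_getD, hsome]; rfl
      have hstep : (stepA j d p).items = xs ++ (pgKey j, a ++ [p.2[j]]) :: zs := by
        unfold stepA
        rw [if_pos hj, hgd]
        exact pvExtend_mid d _ _ xs zs a hit hnd
      have hnd2 : ((stepA j d p).items.map Prod.fst).Nodup := by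
        rw [hstep]
        have he : (xs ++ (pgKey j, a ++ [p.2[j]]) :: zs).map Prod.fst
            = (xs ++ (pgKey j, a) :: zs).map Prod.fst := by simp
        rw [he, ← hit]; exact hnd
      rw [ih _ xs zs _ hstep hnd2]
      simp [pvCol, hsome]
    · have hnone : p.2[j]? = none := by
        rw [List.getElem?_eq_none_iff]; omega
      have hid : stepA j d p = d := by unfold stepA; rw [if_neg hj]
      rw [hid, ih d xs zs a hit hnd]
      simp [pvCol, hnone]

theorem innerA_fresh (j : Nat) (rs : List (String × List String)) :
    ∀ (d : PySem.Dict String (List String)),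
      (d.items.map Prod.fst).Nodup → pgKey j ∉ d.items.map Prod.fst →
      (rs.foldl (stepA j) d).items
        = d.items ++ (if pvCol rs j = [] then [] else [(pgKey j, pvCol rs j)]) := by
  induction rs with
  | nil => intro d _ _; simp [pvCol]
  | cons p rs ih =>
    intro d hnd hfresh
    simp only [List.foldl_cons]
    by_cases hj : j < p.2.length
    · have hsome : p.2[j]? = some p.2[j] := List.getElem?_eq_getElem hj
      have hgd : p.2.getD j "" = p.2[j] := by
        rw [List.getD_eq_getElem?_getD, hsome]; rfl
      have hcont : d.contains (pgKey j) = false := by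
        cases hc : d.contains (pgKey j)
        · rfl
        · exfalso
          rw [PySem.Dict.contains_iff_mem_keys] at hc
          exact hfresh hc
      have hstep : (stepA j d p).items = d.items ++ (pgKey j, [p.2[j]]) :: [] := by
        unfold stepA
        rw [if_pos hj, hgd]
        simpa using pvExtend_fresh d _ _ hcont
      have hnd2 : ((stepA j d p).items.map Prod.fst).Nodup := by
        rw [hstep]
        simp only [List.map_append, List.map_cons, List.map_nil]
        rw [List.nodup_append]
        refine ⟨hnd, by simp, ?_⟩
        intro x hx y hy
        rw [List.mem_singleton] at hy
        subst hy
        intro hxy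
        rw [hxy] at hx
        exact hfresh hx
      rw [innerA_ext j rs _ d.items [] _ hstep hnd2]
      have hcol : pvCol (p :: rs) j = p.2[j] :: pvCol rs j := by
        simp [pvCol, hsome]
      rw [hcol, if_neg (List.cons_ne_nil _ _), List.singleton_append]
    · have hnone : p.2[j]? = none := by rw [List.getElem?_eq_none_iff]; omega
      have hid : stepA j d p = d := by unfold stepA; rw [if_neg hj]
      rw [hid, ih d hnd hfresh]
      have hcol : pvCol (p :: rs) j = pvCol rs j := by simp [pvCol, hnone]
      rw [hcol]

theorem map_fst_pvCanon (rs : List (String × List String)) (n : Nat) :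
    (pvCanon rs n).map Prod.fst = (List.range n).map pgKey := by
  simp [pvCanon, List.map_map, Function.comp_def]

theorem nodup_pgKey_range (n : Nat) : ((List.range n).map pgKey).Nodup :=
  (List.nodup_range).map pgKey_injective

theorem outerA (rs : List (String × List String)) (n : Nat)
    (hcol : ∀ i, i < n → pvCol rs i ≠ []) :
    ((List.range n).foldl (fun acc j => rs.foldl (stepA j) acc) PySem.Dict.empty).items
      = pvCanon rs n := by
  induction n with
  | zero => rfl
  | succ n ih =>
    have ihn := ih (fun i hi => hcol i (by omega))
    rw [List.range_succ, List.foldl_append]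
    simp only [List.foldl_cons, List.foldl_nil]
    set d := (List.range n).foldl (fun acc j => rs.foldl (stepA j) acc) PySem.Dict.empty with hd
    have hnd : (d.items.map Prod.fst).Nodup := by
      rw [ihn, map_fst_pvCanon]; exact nodup_pgKey_range n
    have hfresh : pgKey n ∉ d.items.map Prod.fst := by
      rw [ihn, map_fst_pvCanon]
      intro h
      rcases List.mem_map.mp h with ⟨i, hi, hik⟩
      have := pgKey_injective hik
      rw [List.mem_range] at hi
      omega
    rw [innerA_fresh n rs d hnd hfresh, ihn, if_neg (hcol n (by omega))]
    simp [pvCanon, List.range_succ]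

-- ---- B's per-role loop ----

def pvMix (rs : List (String × List String)) (hs : List String) (M s : Nat) :
    List (String × List String) :=
  (List.range (max M s)).map (fun i =>
    (pgKey i, pvCol rs i ++ if i < s then [hs.getD i ""] else []))

theorem pvCol_empty_of_ge (rs : List (String × List String)) (M i : Nat)
    (hb : ∀ p ∈ rs, p.2.length ≤ M) (hi : M ≤ i) : pvCol rs i = [] := by
  apply List.filterMap_eq_nil_iff.mpr
  intro p hp
  rw [List.getElem?_eq_none_iff]
  have := hb p hp
  omega

theorem range_split (s M : Nat) (h : s ≤ M) :
    List.range M = List.range s ++ List.range' s (M - s) := by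
  rw [List.range_eq_range', List.range_eq_range']
  have h1 := @List.range'_append 0 s (M - s) 1
  simp only [Nat.zero_add, Nat.one_mul] at h1
  rw [show s + (M - s) = M from by omega] at h1
  exact h1.symm

theorem map_fst_pvMix (rs : List (String × List String)) (hs : List String) (M s : Nat) :
    (pvMix rs hs M s).map Prod.fst = (List.range (max M s)).map pgKey := by
  simp [pvMix, List.map_map, Function.comp_def]

theorem subB (rs : List (String × List String)) (hs : List String) (M : Nat)
    (hb : ∀ p ∈ rs, p.2.length ≤ M) :
    ∀ (ys : List String) (s : Nat) (d : PySem.Dict String (List String)),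
      hs.drop s = ys → s ≤ hs.length → d.items = pvMix rs hs M s →
      ((PySem.List.enumerate ys (s : Int)).foldl (fun acc ih =>
          pvExtend acc ("pg" ++ PySem.Int.toStr (ih.1 + 1)) [ih.2]) d).items
        = pvMix rs hs M hs.length := by
  intro ys
  induction ys with
  | nil =>
    intro s d hdrop hle hit
    have hge : hs.length ≤ s := by
      by_contra hc
      have := List.drop_eq_nil_iff.mp hdrop
      omega
    have hs_eq : s = hs.length := by omega
    rw [PySem.List.enumerate_nil, List.foldl_nil, hit, hs_eq]
  | cons y ys ihy =>
    intro s d hdrop hle hit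
    have hslt : s < hs.length := by
      by_contra hc
      rw [List.drop_eq_nil_iff.mpr (by omega)] at hdrop
      exact (List.cons_ne_nil y ys) hdrop.symm
    have hcons : hs.drop s = hs[s] :: hs.drop (s + 1) := List.drop_eq_getElem_cons hslt
    have hy : hs.getD s "" = y := by
      rw [List.getD_eq_getElem?_getD, List.getElem?_eq_getElem hslt]
      rw [hcons] at hdrop
      exact congrArg (Option.getD · "") (congrArg some (List.head_eq_of_cons_eq hdrop))
    have hdrop' : hs.drop (s + 1) = ys := by
      rw [hcons] at hdrop
      exact List.tail_eq_of_cons_eq hdrop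
    rw [PySem.List.enumerate_cons]
    simp only [List.foldl_cons]
    have hnd : (d.items.map Prod.fst).Nodup := by
      rw [hit, map_fst_pvMix]; exact nodup_pgKey_range _
    have hstep : (pvExtend d ("pg" ++ PySem.Int.toStr ((s : Int) + 1)) [y]).items
        = pvMix rs hs M (s + 1) := by
      have hkeyeq : ("pg" ++ PySem.Int.toStr ((s : Int) + 1)) = pgKey s := rfl
      rw [hkeyeq]
      by_cases hsM : s < M
      · -- the key pg(s+1) already exists, in the middle of the list
        have hmax1 : max M s = M := by omega
        have hmax2 : max M (s + 1) = M := by omega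
        obtain ⟨t, ht⟩ : ∃ t, M - s = t + 1 := ⟨M - s - 1, by omega⟩
        have hsplit := range_split s M (by omega)
        have hr' : List.range' s (M - s) = s :: List.range' (s + 1) t := by
          rw [ht, List.range'_succ]
        have hitems : d.items
            = ((List.range s).map (fun i =>
                (pgKey i, pvCol rs i ++ if i < s then [hs.getD i ""] else [])))
              ++ (pgKey s, pvCol rs s) ::
                ((List.range' (s + 1) t).map (fun i =>
                  (pgKey i, pvCol rs i ++ if i < s then [hs.getD i ""] else []))) := by
          rw [hit]
          unfold pvMix
          rw [hmax1, hsplit, List.map_append, hr', List.map_cons]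
          congr 2
          rw [if_neg (by omega)]
          simp
        rw [pvExtend_mid d _ _ _ _ _ hitems hnd]
        unfold pvMix
        rw [hmax2, hsplit, List.map_append, hr', List.map_cons]
        congr 1
        · apply List.map_congr_left
          intro i hi
          rw [List.mem_range] at hi
          rw [if_pos (by omega), if_pos (by omega)]
        · congr 1
          · rw [if_pos (by omega), hy]
          · apply List.map_congr_left
            intro i hi
            rw [List.mem_range'_1] at hi
            rw [if_neg (by omega), if_neg (by omega)]
      · -- fresh key appended at the end
        have hmax1 : max M s = s := by omega
        have hmax2 : max M (s + 1) = s + 1 := by omega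
        have hfresh : d.contains (pgKey s) = false := by
          cases hc : d.contains (pgKey s)
          · rfl
          · exfalso
            rw [PySem.Dict.contains_iff_mem_keys] at hc
            have hkeys : d.keys = d.items.map Prod.fst := rfl
            rw [hkeys, hit, map_fst_pvMix] at hc
            rcases List.mem_map.mp hc with ⟨i, hi, hik⟩
            have := pgKey_injective hik
            rw [List.mem_range] at hi
            omega
        rw [pvExtend_fresh d _ _ hfresh, hit]
        unfold pvMix
        rw [hmax1, hmax2, List.range_succ, List.map_append]
        congr 1
        · apply List.map_congr_left
          intro i hi
          rw [List.mem_range] at hi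
          rw [if_pos (by omega), if_pos (by omega)]
        · simp only [List.map_cons, List.map_nil]
          rw [if_pos (by omega), hy, pvCol_empty_of_ge rs M s hb (by omega)]
          simp
    exact ihy (s + 1) _ hdrop' (by omega) hstep

theorem pvMix_zero (rs : List (String × List String)) (hs : List String) (M : Nat) :
    pvMix rs hs M 0 = pvCanon rs M := by
  simp [pvMix, pvCanon]

theorem pvMix_full (rs : List (String × List String)) (r : String) (hs : List String) (M : Nat) :
    pvMix rs hs M hs.length = pvCanon (rs ++ [(r, hs)]) (max M hs.length) := by
  unfold pvMix pvCanon
  apply List.map_congr_left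
  intro i hi
  rw [List.mem_range] at hi
  have hcol : pvCol (rs ++ [(r, hs)]) i
      = pvCol rs i ++ (if i < hs.length then [hs.getD i ""] else []) := by
    unfold pvCol
    rw [List.filterMap_append]
    congr 1
    by_cases h : i < hs.length
    · have hsome : hs[i]? = some hs[i] := List.getElem?_eq_getElem h
      have hgd : hs.getD i "" = hs[i] := by
        rw [List.getD_eq_getElem?_getD, hsome]; rfl
      rw [if_pos h]
      simp only [List.filterMap_cons, List.filterMap_nil, hsome]
      rw [hgd]
    · have hnone : hs[i]? = none := by rw [List.getElem?_eq_none_iff]; omega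
      rw [if_neg h]
      simp [hnone]
  rw [hcol]

theorem pvMaxLen_bound (rs : List (String × List String)) :
    ∀ p ∈ rs, p.2.length ≤ pvMaxLen rs := by
  intro p hp
  unfold pvMaxLen
  have h := PySem.List.le_foldl_max (rs.map (fun p => p.2.length)) 0
  exact h.2 _ (List.mem_map.mpr ⟨p, hp, rfl⟩)

theorem pvMaxLen_append (rs : List (String × List String)) (p : String × List String) :
    pvMaxLen (rs ++ [p]) = max (pvMaxLen rs) p.2.length := by
  unfold pvMaxLen
  rw [List.map_append, List.foldl_append]
  simp

theorem mainB (rs : List (String × List String)) :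
    (rs.foldl stepB PySem.Dict.empty).items = pvCanon rs (pvMaxLen rs) := by
  induction rs using List.reverseRecOn with
  | nil => rfl
  | append_singleton rs p ih =>
    rw [List.foldl_append]
    simp only [List.foldl_cons, List.foldl_nil]
    obtain ⟨r, hs⟩ := p
    have hsub := subB rs hs (pvMaxLen rs) (pvMaxLen_bound rs) hs 0
      (rs.foldl stepB PySem.Dict.empty) (by simp) (by omega)
      (by rw [ih, pvMix_zero])
    simp only [Nat.cast_zero] at hsub
    calc (stepB (rs.foldl stepB PySem.Dict.empty) (r, hs)).items
        = pvMix rs hs (pvMaxLen rs) hs.length := hsub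
      _ = pvCanon (rs ++ [(r, hs)]) (max (pvMaxLen rs) hs.length) :=
          pvMix_full rs r hs (pvMaxLen rs)
      _ = pvCanon (rs ++ [(r, hs)]) (pvMaxLen (rs ++ [(r, hs)])) := by
          rw [pvMaxLen_append]

theorem stageB_items (rs : List (String × List String)) :
    (rs.foldl (fun acc p =>
        (PySem.List.enumerate p.2 0).foldl (fun acc ih =>
          pvExtend acc ("pg" ++ PySem.Int.toStr (ih.1 + 1)) [ih.2]) acc) PySem.Dict.empty).items
      = pvCanon rs (pvMaxLen rs) := mainB rs

-- ---- A's group-building stage equals the canonical value ----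

theorem mainA (rs : List (String × List String)) (m : Nat)
    (hmax : PySem.List.max? (rs.map (fun p => p.2.length)) (fun x => x) = some m ∨
            (PySem.List.max? (rs.map (fun p => p.2.length)) (fun x => x) = none ∧ m = 0)) :
    ((PySem.List.pyRange 0 (m : Int) 1).foldl (fun acc i =>
        rs.foldl (fun acc p =>
          if i < (p.2.length : Int) then
            pvExtend acc ("pg" ++ PySem.Int.toStr (i + 1)) [PySem.List.pyGetD p.2 i ""]
          else acc) acc) PySem.Dict.empty).items
      = pvCanon rs m := by
  have hcol : ∀ i, i < m → pvCol rs i ≠ [] := by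
    intro i hi hnil
    rcases hmax with h | ⟨_, hm0⟩
    · have hmem := PySem.List.max?_mem h
      rcases List.mem_map.mp hmem with ⟨p, hp, hlen⟩
      have hn := List.filterMap_eq_nil_iff.mp hnil p hp
      rw [List.getElem?_eq_none_iff] at hn
      omega
    · omega
  have hrange : PySem.List.pyRange 0 (m : Int) 1
      = (List.range m).map (fun k : Nat => (k : Int)) := by
    rw [PySem.List.pyRange_one]
    simp
  rw [hrange, List.foldl_map]
  have hfun : (fun (acc : PySem.Dict String (List String)) (j : Nat) =>
      rs.foldl (fun acc p =>
        if ((j : Int)) < (p.2.length : Int) then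
          pvExtend acc ("pg" ++ PySem.Int.toStr ((j : Int) + 1)) [PySem.List.pyGetD p.2 (j : Int) ""]
        else acc) acc)
      = (fun acc j => rs.foldl (stepA j) acc) := by
    funext acc j
    congr 1
    funext acc' p
    by_cases h : j < p.2.length
    · rw [if_pos (by exact_mod_cast h)]
      unfold stepA
      rw [if_pos h, PySem.List.pyGetD_natCast]
      rfl
    · rw [if_neg (by exact_mod_cast h)]
      unfold stepA
      rw [if_neg h]
  rw [hfun]
  exact outerA rs m hcol

theorem maxLen_eq (rs : List (String × List String)) :
    (match PySem.List.max? (rs.map (fun p => p.2.length)) (fun x => x) with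
      | some m => m
      | none => 0) = pvMaxLen rs := by
  unfold pvMaxLen
  cases rs with
  | nil => rfl
  | cons p rs =>
    rw [List.map_cons, PySem.List.max?_id_cons]
    simp

theorem stageA_items (rs : List (String × List String)) :
    ((PySem.List.pyRange 0
        ((match PySem.List.max? (rs.map (fun p => p.2.length)) (fun x => x) with
          | some m => m
          | none => 0 : Nat) : Int) 1).foldl (fun acc i =>
        rs.foldl (fun acc p =>
          if i < (p.2.length : Int) then
            pvExtend acc ("pg" ++ PySem.Int.toStr (i + 1)) [PySem.List.pyGetD p.2 i ""]
          else acc) acc) PySem.Dict.empty).items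
      = pvCanon rs (pvMaxLen rs) := by
  cases hm : PySem.List.max? (rs.map (fun p => p.2.length)) (fun x => x) with
  | some m =>
    have hme : m = pvMaxLen rs := by rw [← maxLen_eq rs, hm]
    rw [← hme]
    exact mainA rs m (Or.inl hm)
  | none =>
    have hme : 0 = pvMaxLen rs := by rw [← maxLen_eq rs, hm]
    rw [← hme]
    exact mainA rs 0 (Or.inr ⟨hm, rfl⟩)

-- ---- the shared sharddb tail ----

theorem tail_eq (d : PySem.Dict String (List String))
    (pgs pgs' : PySem.Dict String (List String)) (h : pgs = pgs') :
    (if d.contains "be-sharddb" then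
      if (d.getD "be-sharddb" []).length == 1 then
        pvExtend pgs "pg1" (d.getD "be-sharddb" [])
      else
        pvExtend (pvExtend pgs "pg2"
          (PySem.List.slice (d.getD "be-sharddb" []) none
            (some (PySem.Int.floordiv (((d.getD "be-sharddb" []).length : Int)) 2)))) "pg1"
          (PySem.List.slice (d.getD "be-sharddb" [])
            (some (PySem.Int.floordiv (((d.getD "be-sharddb" []).length : Int)) 2)) none)
    else pgs).items
    = (match d.get? "be-sharddb" with
      | none => pgs'.items
      | some sharddb_hosts =>
        if sharddb_hosts.length == 1 then
          (pvExtend pgs' "pg1" sharddb_hosts).items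
        else
          (pvExtend (pvExtend pgs' "pg2"
            (PySem.List.slice sharddb_hosts none
              (some (PySem.Int.floordiv ((sharddb_hosts.length : Int)) 2)))) "pg1"
            (PySem.List.slice sharddb_hosts
              (some (PySem.Int.floordiv ((sharddb_hosts.length : Int)) 2)) none)).items) := by
  subst h
  cases hg : d.get? "be-sharddb" with
  | none =>
    have hc : d.contains "be-sharddb" = false := by
      rw [PySem.Dict.contains_eq_isSome_get?, hg]
      rfl
    rw [hc]
    simp
  | some sh =>
    have hc : d.contains "be-sharddb" = true := by
      rw [PySem.Dict.contains_eq_isSome_get?, hg]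
      rfl
    have hgd : d.getD "be-sharddb" [] = sh := PySem.Dict.getD_of_get?_eq_some d [] hg
    rw [hc, hgd]
    by_cases h1 : (sh.length == 1) = true <;> simp [h1]

-- ===== VERDICT (by name: the statement is the Claim_ definition above) =====
theorem create_patch_groups_spec : Claim_equal_create_patch_groups := by
  intro hbr _
  unfold Spec_create_patch_groups create_patch_groups create_patch_groups_alt
  generalize PySem.Dict.ofList hbr = d
  dsimp only
  rw [PySem.List.foldl_if_eq_foldl_filter]
  refine tail_eq d _ _ ?_
  apply PySem.Dict.ext
  rw [stageA_items, stageB_items]
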